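-- pv_equiv track=rewrite | github.com/mchang21/Advent_Of_Code | 2021/Day_10/10.py | get_middle_score
-- ===== SOURCE A (Python) =====
-- def get_middle_score(sequences):
--     points = {'(':1, '[':2, '{':3, '<':4}
--     scores = []
--     for s in sequences:
--         score = 0
--         for c in s[::-1]:
--             score = (score * 5)  + points[c]
--         scores.append(score)
--     scores.sort()
--     return scores[len(scores)//2]
-- ===== SOURCE B (Python) =====
-- def _select(xs, k):
--     # iterative quickselect: value at ascending rank k
--     while True:
--         p = xs[0]
--         lt = [x for x in xs if x < p]
--         if k < len(lt):
--             xs = lt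
--             continue
--         eq = sum(1 for x in xs if x == p)
--         if k < len(lt) + eq:
--             return p
--         k -= len(lt) + eq
--         xs = [x for x in xs if x > p]
--
--
-- def get_middle_score(sequences):
--     points = {'(': 1, '[': 2, '{': 3, '<': 4}
--     scores = []
--     for s in sequences:
--         score, pw = 0, 1
--         for c in s:
--             score += points[c] * pw
--             pw *= 5
--         scores.append(score)
--     return _select(scores, len(scores) // 2)
-- ===== Notes on version B (the rewrite author's own statement) =====
-- stated objective: alternative
-- what changed: Per-sequence score is computed by a forward pass carrying a power-of-5 multiplier instead of a reversed Horner loop, and the median is found by an iterative quickselect (partition around the first element, loop into the side holding rank len//2) instead of sorting and indexing.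
import Mathlib
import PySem

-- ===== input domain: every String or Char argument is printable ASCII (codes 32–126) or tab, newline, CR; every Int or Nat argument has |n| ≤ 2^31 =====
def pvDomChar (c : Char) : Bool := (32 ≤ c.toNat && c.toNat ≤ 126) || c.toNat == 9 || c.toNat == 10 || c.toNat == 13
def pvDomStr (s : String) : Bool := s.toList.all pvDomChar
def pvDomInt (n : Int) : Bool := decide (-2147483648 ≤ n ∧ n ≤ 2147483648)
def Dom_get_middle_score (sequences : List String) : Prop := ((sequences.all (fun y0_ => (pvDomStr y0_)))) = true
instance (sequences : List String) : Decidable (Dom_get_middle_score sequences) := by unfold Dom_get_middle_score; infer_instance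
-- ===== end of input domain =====

-- B scores each sequence with a forward loop carrying a power-of-5 multiplier (instead of A's
-- reversed Horner loop) and finds the middle element by an iterative quickselect on rank len//2
-- (instead of sorting and indexing); alternative decomposition, same results.

-- ===== PORT A =====
def pvPoints : PySem.Dict Char Int := PySem.Dict.ofList [('(', 1), ('[', 2), ('{', 3), ('<', 4)]

def get_middle_score (sequences : List String) : Int :=
  -- points[c] raises KeyError outside '([{<' and scores[len//2] raises IndexError on [];
  -- Pre_ excludes exactly those inputs, so the getD defaults below are never reached there.
  let scores := sequences.foldl (fun acc s =>
    acc ++ [s.toList.reverse.foldl (fun score c => score * 5 + PySem.Dict.getD pvPoints c 0) 0]) []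
  let sortedScores := PySem.List.sorted scores (fun x => x) false
  PySem.List.pyGetD sortedScores (PySem.Int.floordiv (sortedScores.length : Int) 2) 0

-- ===== PORT B =====
-- Source B's _score builds the same points dict literal; the shared constant pvPoints stands for both.
-- _score of Source B: forward pass, pw is the running power of 5
def pvScoreB (s : String) : Int :=
  (s.toList.foldl (fun (st : Int × Int) c => (st.1 + PySem.Dict.getD pvPoints c 0 * st.2, st.2 * 5)) (0, 1)).1

-- _select of Source B: iterative quickselect (the while-loop becomes the recursion on the shrunk list);
-- xs[0] on an empty list raises IndexError in Python — unreachable for the ranks _select is called with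
def pvSelect : List Int → Nat → Int
  | [], _ => 0
  | p :: rest, k =>
    let xs := p :: rest
    let lt := xs.filter (fun x => decide (x < p))
    if k < lt.length then pvSelect lt k
    else
      let eqc := xs.countP (fun x => x == p)
      if k < lt.length + eqc then p
      else pvSelect (xs.filter (fun x => decide (p < x))) (k - (lt.length + eqc))
termination_by xs _ => xs.length
decreasing_by
  · exact List.length_filter_lt_length_iff_exists.mpr ⟨p, by simp, by simp⟩
  · exact List.length_filter_lt_length_iff_exists.mpr ⟨p, by simp, by simp⟩

def get_middle_score_alt (sequences : List String) : Int :=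
  let scores := sequences.map pvScoreB
  pvSelect scores (scores.length / 2)

-- ===== PRECONDITION & SPEC =====
-- Pre_ excludes exactly the inputs where Python A raises: the empty list (IndexError on scores[0])
-- and sequences containing a character outside '([{<' (KeyError in points[c]).
def Pre_get_middle_score (sequences : List String) : Prop :=
  sequences ≠ [] ∧
    (sequences.all (fun s => s.toList.all (fun c => c == '(' || c == '[' || c == '{' || c == '<'))) = true
instance (sequences : List String) : Decidable (Pre_get_middle_score sequences) := by
  unfold Pre_get_middle_score; infer_instance

def pvWitness_get_middle_score : List String := ["(["]

def Spec_get_middle_score (sequences : List String) (out : Int) : Prop := out = get_middle_score_alt sequences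
instance (sequences : List String) (out : Int) : Decidable (Spec_get_middle_score sequences out) := by unfold Spec_get_middle_score; infer_instance

-- ===== CLAIM (what is proved, stated in full; the proofs are below) =====
def Claim_equal_get_middle_score : Prop := ∀ (sequences : List String), Dom_get_middle_score sequences → Pre_get_middle_score sequences → Spec_get_middle_score sequences (get_middle_score sequences)

-- ===== LEMMAS AND PROOFS =====

-- forward multiplier pass vs Horner from the right: loop invariant of Source B's inner loop
lemma pv_foldl_mulacc (l : List Char) (a pw : Int) :
    (l.foldl (fun (st : Int × Int) c => (st.1 + PySem.Dict.getD pvPoints c 0 * st.2, st.2 * 5)) (a, pw)).1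
      = a + pw * l.foldr (fun c sc => sc * 5 + PySem.Dict.getD pvPoints c 0) 0 := by
  induction l generalizing a pw with
  | nil => simp
  | cons c t ih => simp only [List.foldl_cons, List.foldr_cons, ih]; ring

lemma pv_score_eq (s : String) :
    s.toList.reverse.foldl (fun score c => score * 5 + PySem.Dict.getD pvPoints c 0) 0 = pvScoreB s := by
  simp only [pvScoreB, List.foldl_reverse, pv_foldl_mulacc]
  ring_nf

-- a sorted list is its <p part, then its =p part, then its >p part
lemma pv_sorted_partition (s : List Int) (p : Int) (hs : s.Pairwise (· ≤ ·)) :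
    s = s.filter (fun x => decide (x < p)) ++ s.filter (fun x => x == p) ++ s.filter (fun x => decide (p < x)) := by
  have hBC : ((s.filter (fun x => x == p)) ++ (s.filter (fun x => decide (p < x)))).Perm
      (s.filter (fun x => !decide (x < p))) := by
    have p2 := List.filter_append_perm (fun x => x == p) (s.filter (fun x => !decide (x < p)))
    rw [List.filter_filter, List.filter_filter] at p2
    have e1 : s.filter (fun x => (x == p) && !decide (x < p)) = s.filter (fun x => x == p) := by
      apply List.filter_congr; intro x _
      by_cases h : x = p <;> simp [h]
    have e2 : s.filter (fun x => (!(x == p)) && !decide (x < p)) = s.filter (fun x => decide (p < x)) := by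
      apply List.filter_congr; intro x _
      by_cases h : x = p
      · simp [h]
      · by_cases h2 : x < p
        · simp [h2]
          omega
        · have h3 : p < x := by omega
          simp [h, h3]
          omega
    rwa [e1, e2] at p2
  have hperm : (s.filter (fun x => decide (x < p)) ++ s.filter (fun x => x == p) ++ s.filter (fun x => decide (p < x))).Perm s := by
    rw [List.append_assoc]
    exact (List.Perm.append_left _ hBC).trans (List.filter_append_perm _ s)
  have hpw : (s.filter (fun x => decide (x < p)) ++ s.filter (fun x => x == p) ++ s.filter (fun x => decide (p < x))).Pairwise (· ≤ ·) := by
    rw [List.pairwise_append, List.pairwise_append]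
    refine ⟨⟨hs.sublist List.filter_sublist, hs.sublist List.filter_sublist, ?_⟩,
      hs.sublist List.filter_sublist, ?_⟩
    · intro x hx y hy
      have hx' := (List.mem_filter.mp hx).2
      have hy' := (List.mem_filter.mp hy).2
      have : x < p := by simpa using hx'
      have : y = p := by simpa using hy'
      omega
    · intro x hx y hy
      have hy' : p < y := by simpa using (List.mem_filter.mp hy).2
      rcases List.mem_append.mp hx with hx | hx
      · have : x < p := by simpa using (List.mem_filter.mp hx).2
        omega
      · have : x = p := by simpa using (List.mem_filter.mp hx).2
        omega
  exact (PySem.List.eq_of_perm_of_pairwise_le hperm hpw hs).symm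

-- quickselect returns the element at ascending rank k of any sorted rearrangement
theorem pv_select_spec (xs : List Int) (k : Nat) (hk : k < xs.length) (s : List Int)
    (hperm : s.Perm xs) (hsort : s.Pairwise (· ≤ ·)) : pvSelect xs k = s.getD k 0 := by
  match xs with
  | [] => simp at hk
  | p :: rest =>
    have hpart := pv_sorted_partition s p hsort
    have hpA : (s.filter (fun x => decide (x < p))).Perm ((p :: rest).filter (fun x => decide (x < p))) :=
      hperm.filter _
    have hpB : (s.filter (fun x => x == p)).Perm ((p :: rest).filter (fun x => x == p)) := hperm.filter _
    have hpC : (s.filter (fun x => decide (p < x))).Perm ((p :: rest).filter (fun x => decide (p < x))) :=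
      hperm.filter _
    have hlA := hpA.length_eq
    have hlB := hpB.length_eq
    have hcnt : (p :: rest).countP (fun x => x == p) = ((p :: rest).filter (fun x => x == p)).length :=
      List.countP_eq_length_filter
    have hlen : s.length = (p :: rest).length := hperm.length_eq
    have hlsum : (s.filter (fun x => decide (x < p))).length + (s.filter (fun x => x == p)).length
        + (s.filter (fun x => decide (p < x))).length = s.length := by
      conv_rhs => rw [hpart]
      simp [List.length_append]
      omega
    rw [pvSelect]
    simp only []
    by_cases h1 : k < ((p :: rest).filter (fun x => decide (x < p))).length
    · rw [if_pos h1]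
      have hrec := pv_select_spec ((p :: rest).filter (fun x => decide (x < p))) k h1
        (s.filter (fun x => decide (x < p))) hpA (hsort.sublist List.filter_sublist)
      rw [hrec]
      conv_rhs => rw [hpart]
      rw [List.getD_append _ _ _ _ (by rw [List.length_append]; omega),
          List.getD_append _ _ _ _ (by omega)]
    · rw [if_neg h1]
      by_cases h2 : k < ((p :: rest).filter (fun x => decide (x < p))).length
          + (p :: rest).countP (fun x => x == p)
      · rw [if_pos h2]
        conv_rhs => rw [hpart]
        rw [List.getD_append _ _ _ _ (by rw [List.length_append]; omega),
            List.getD_append_right _ _ _ _ (by omega)]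
        have hidx : k - (s.filter (fun x => decide (x < p))).length < (s.filter (fun x => x == p)).length := by
          omega
        rw [List.getD_eq_getElem _ _ hidx]
        have hmem : (s.filter (fun x => x == p))[k - (s.filter (fun x => decide (x < p))).length] ∈
            s.filter (fun x => x == p) := List.getElem_mem _
        have hx : (s.filter (fun x => x == p))[k - (s.filter (fun x => decide (x < p))).length] = p := by
          simpa using (List.mem_filter.mp hmem).2
        exact hx.symm
      · rw [if_neg h2]
        have hk' : k - (((p :: rest).filter (fun x => decide (x < p))).length
            + (p :: rest).countP (fun x => x == p)) < ((p :: rest).filter (fun x => decide (p < x))).length := by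
          have := hpC.length_eq
          omega
        have hrec := pv_select_spec ((p :: rest).filter (fun x => decide (p < x)))
          (k - (((p :: rest).filter (fun x => decide (x < p))).length + (p :: rest).countP (fun x => x == p)))
          hk' (s.filter (fun x => decide (p < x))) hpC (hsort.sublist List.filter_sublist)
        rw [hrec]
        conv_rhs => rw [hpart]
        rw [List.getD_append_right _ _ _ _ (by rw [List.length_append]; omega)]
        congr 1
        rw [List.length_append]
        omega
termination_by xs.length
decreasing_by
  · exact List.length_filter_lt_length_iff_exists.mpr ⟨p, by simp, by simp⟩
  · exact List.length_filter_lt_length_iff_exists.mpr ⟨p, by simp, by simp⟩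

-- ===== VERDICT (by name: the statement is the Claim_ definition above) =====
theorem get_middle_score_spec : Claim_equal_get_middle_score := by
  intro sequences _ hpre
  obtain ⟨hne, -⟩ := hpre
  show get_middle_score sequences = get_middle_score_alt sequences
  simp only [get_middle_score, get_middle_score_alt]
  have hsc : sequences.foldl (fun acc s =>
      acc ++ [s.toList.reverse.foldl (fun score c => score * 5 + PySem.Dict.getD pvPoints c 0) 0]) []
      = sequences.map pvScoreB := by
    have h := PySem.List.foldl_append_singleton_eq_map
      (fun s : String => s.toList.reverse.foldl (fun score c => score * 5 + PySem.Dict.getD pvPoints c 0) 0)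
      sequences ([] : List Int)
    simp only [List.nil_append] at h
    rw [h]
    exact List.map_congr_left (fun s _ => pv_score_eq s)
  rw [hsc]
  have hne' : (sequences.map pvScoreB) ≠ [] := by simpa using hne
  have hpos : 0 < (sequences.map pvScoreB).length := List.length_pos_iff.mpr hne'
  have hsl : (PySem.List.sorted (sequences.map pvScoreB) (fun x => x) false).length
      = (sequences.map pvScoreB).length := by simp [pysem]
  have hk : (sequences.map pvScoreB).length / 2 < (sequences.map pvScoreB).length :=
    Nat.div_lt_self hpos (by omega)
  have hfd : PySem.Int.floordiv (((sequences.map pvScoreB).length : Nat) : Int) 2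
      = (((sequences.map pvScoreB).length / 2 : Nat) : Int) := by
    exact_mod_cast PySem.Int.floordiv_natCast (sequences.map pvScoreB).length 2
  rw [hsl, hfd]
  have hget : PySem.List.pyGetD (PySem.List.sorted (sequences.map pvScoreB) (fun x => x) false)
      (((sequences.map pvScoreB).length / 2 : Nat) : Int) 0
      = (PySem.List.sorted (sequences.map pvScoreB) (fun x => x) false).getD
        ((sequences.map pvScoreB).length / 2) 0 :=
    PySem.List.pyGetD_natCast _ _ _
  rw [hget]
  exact (pv_select_spec (sequences.map pvScoreB) ((sequences.map pvScoreB).length / 2) hk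
    (PySem.List.sorted (sequences.map pvScoreB) (fun x => x) false)
    (PySem.List.sorted_perm _ _ _)
    (by simpa using PySem.List.sorted_pairwise (xs := sequences.map pvScoreB) (key := fun x : Int => x))).symm
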